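-- pv_equiv track=rewrite | github.com/ZeepReactorr/PHYG | TP/kmers.py | stream_kmers
-- ===== SOURCE A (Python) =====
-- def encode_nucl(nucl):
--     """
--     Encode a nucleotide into a 2-bit integer
--     :param str nucl: The nucleotide to encode
--     :return (int, int): The encoded nucleotide and its reverse complement
--     """
--     encoded = (ord(nucl) >> 1) & 0b11 # Extract the two bits of the ascii code that represent the nucleotide
--     rencoded = (encoded + 2) & 0b11 # Complement encoding with bit tricks. Avoid slow if statement.
--
--     return encoded, rencoded
--
-- def stream_kmers(seq, k):
--     # Initialize the kmer and its reverse complement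
--     kmer = 0
--     rkmer = 0
--
--     # Add the first k-1 nucleotides to the first kmer and its reverse complement
--     for i in range(k-1):
--         nucl, rnucl = encode_nucl(seq[i])
--         kmer |= nucl << (2*(k-2-i))
--         rkmer |= rnucl << (2*(i+1))
--
--     mask = (1 << (2*(k-1))) - 1
--
--     # Yield the kmers
--     for i in range(k-1, len(seq)):
--         nucl, rnucl = encode_nucl(seq[i])
--         # Remove the leftmost nucleotide from the kmer
--         kmer &= mask
--         # Shift the kmer to make space for the new nucleotide
--         kmer <<= 2
--         # Add the new nucleotide to the kmer
--         kmer |= nucl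
--         # Make space for the new nucleotide in the reverse kmer (remove the rightmost nucleotide by side effect)
--         rkmer >>= 2
--         # Add the new nucleotide to the reverse kmer
--         rkmer |= rnucl << (2*(k-1))
--
--         yield xorshift(min(kmer, rkmer))
--
-- def xorshift(val):
--     val ^= val << 13
--     val &= 0xFFFFFFFFFFFFFFFFF
--     val ^= val >> 7
--     val ^= val << 17
--     val &= 0xFFFFFFFFFFFFFFFFF
--     return val
-- ===== SOURCE B (Python) =====
-- def encode_nucl(nucl):
--     encoded = (ord(nucl) >> 1) & 0b11
--     rencoded = (encoded + 2) & 0b11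
--     return encoded, rencoded
--
-- def xorshift(val):
--     val ^= val << 13
--     val &= 0xFFFFFFFFFFFFFFFFF
--     val ^= val >> 7
--     val ^= val << 17
--     val &= 0xFFFFFFFFFFFFFFFFF
--     return val
--
-- def stream_kmers(seq, k):
--     # Recompute each k-mer from scratch per window instead of rolling updates.
--     if k < 1:
--         raise ValueError("k must be at least 1")
--     for start in range(len(seq) - k + 1):
--         kmer = 0
--         rkmer = 0
--         for t in range(k):
--             nucl, rnucl = encode_nucl(seq[start + t])
--             kmer = (kmer << 2) | nucl
--             rkmer |= rnucl << (2 * t)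
--         yield xorshift(min(kmer, rkmer))
-- ===== Notes on version B (the rewrite author's own statement) =====
-- stated objective: alternative
-- what changed: A streams hashes with a rolling update (mask/shift/or of carried kmer and rkmer state primed by a setup loop); B recomputes each window's forward and reverse-complement codes from scratch with a nested per-window scan, trading A's O(n) incremental pass for a simpler stateless O(n*k) scan.
-- crash fix: For k >= 1 with len(seq) < k-1, A raises IndexError (its setup loop indexes seq eagerly) while B returns [] since no window exists; for k < 1 both raise ValueError. — e.g. on stream_kmers("A", 3): A raises IndexError, B returns []
import Mathlib
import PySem

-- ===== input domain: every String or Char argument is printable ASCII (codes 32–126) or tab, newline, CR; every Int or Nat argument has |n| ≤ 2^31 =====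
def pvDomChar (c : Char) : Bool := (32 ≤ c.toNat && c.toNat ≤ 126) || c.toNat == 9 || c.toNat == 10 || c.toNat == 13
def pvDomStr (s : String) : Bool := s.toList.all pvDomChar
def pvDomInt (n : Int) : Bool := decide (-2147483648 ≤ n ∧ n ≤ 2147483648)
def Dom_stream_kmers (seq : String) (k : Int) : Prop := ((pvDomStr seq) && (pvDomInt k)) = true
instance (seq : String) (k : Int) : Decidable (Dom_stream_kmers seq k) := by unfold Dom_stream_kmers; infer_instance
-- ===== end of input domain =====

-- B replaces A's rolling-hash update (mask/shift/or of a carried state) by an independent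
-- from-scratch recomputation of each window's codes; alternative decomposition, same output.

-- ===== PORT A =====
-- helper encode_nucl, shared verbatim by both Python versions
def encode_nucl (nucl : Char) : Int × Int :=
  let encoded : Int := PySem.Int.band ((nucl.toNat : Int) >>> 1) 3
  let rencoded : Int := PySem.Int.band (encoded + 2) 3
  (encoded, rencoded)

-- helper xorshift, shared verbatim by both Python versions
def xorshift (val : Int) : Int :=
  let v1 := PySem.Int.band (PySem.Int.bxor val (val <<< 13)) 0xFFFFFFFFFFFFFFFFF
  let v2 := PySem.Int.bxor v1 (v1 >>> 7)
  PySem.Int.band (PySem.Int.bxor v2 (v2 <<< 17)) 0xFFFFFFFFFFFFFFFFF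

-- the generator is ported as the list of its yields; shift amounts are nonnegative for every
-- index the loops visit under Pre_ (1 ≤ k), where .toNat is exact
def stream_kmers (seq : String) (k : Int) : List Int :=
  let cs := seq.toList
  let setup := (PySem.List.pyRange 0 (k - 1) 1).foldl (fun (st : Int × Int) i =>
      let nr := encode_nucl (PySem.List.pyGetD cs i ' ')
      (PySem.Int.bor st.1 (nr.1 <<< (2 * (k - 2 - i)).toNat),
       PySem.Int.bor st.2 (nr.2 <<< (2 * (i + 1)).toNat))) (0, 0)
  let mask : Int := (1 <<< (2 * (k - 1)).toNat) - 1
  let fin := (PySem.List.pyRange (k - 1) (PySem.List.len cs) 1).foldl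
      (fun (st : Int × Int × List Int) i =>
        let nr := encode_nucl (PySem.List.pyGetD cs i ' ')
        let kmer := PySem.Int.bor ((PySem.Int.band st.1 mask) <<< 2) nr.1
        let rkmer := PySem.Int.bor (st.2.1 >>> 2) (nr.2 <<< (2 * (k - 1)).toNat)
        (kmer, rkmer, st.2.2 ++ [xorshift (min kmer rkmer)])) (setup.1, setup.2, [])
  fin.2.2

-- ===== PORT B =====
def stream_kmers_alt (seq : String) (k : Int) : List Int :=
  -- Python B raises ValueError for k < 1 (outside Pre_); [] stands for that non-value here
  if k < 1 then []
  else
  let cs := seq.toList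
  (PySem.List.pyRange 0 (PySem.List.len cs - k + 1) 1).map (fun start =>
    let w := (PySem.List.pyRange 0 k 1).foldl (fun (st : Int × Int) t =>
        let nr := encode_nucl (PySem.List.pyGetD cs (start + t) ' ')
        (PySem.Int.bor (st.1 <<< 2) nr.1,
         PySem.Int.bor st.2 (nr.2 <<< (2 * t).toNat))) (0, 0)
    xorshift (min w.1 w.2))

-- ===== PRECONDITION & SPEC =====
-- Pre_ is exactly where Python A returns: k ≤ 0 raises ValueError (negative shift) at the mask,
-- and len(seq) < k-1 raises IndexError in the setup loop.
def Pre_stream_kmers (seq : String) (k : Int) : Prop :=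
  1 ≤ k ∧ k - 1 ≤ (seq.toList.length : Int)
instance (seq : String) (k : Int) : Decidable (Pre_stream_kmers seq k) := by
  unfold Pre_stream_kmers; infer_instance

def pvWitness_stream_kmers : String × Int := ("ACGT", 2)

-- For k ≥ 1 with len(seq) < k-1 A raises IndexError (its setup loop indexes seq eagerly)
-- while B returns [] — there is no window; B itself rejects k < 1 with ValueError, as A does.
def Raises_stream_kmers (seq : String) (k : Int) : Prop :=
  1 ≤ k ∧ (seq.toList.length : Int) < k - 1
instance (seq : String) (k : Int) : Decidable (Raises_stream_kmers seq k) := by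
  unfold Raises_stream_kmers; infer_instance
def pvRaiseWitness_stream_kmers : String × Int := ("A", 3)
def pvRaiseWitnessOut_stream_kmers : List Int := []

def Spec_stream_kmers (seq : String) (k : Int) (out : List Int) : Prop := out = stream_kmers_alt seq k
instance (seq : String) (k : Int) (out : List Int) : Decidable (Spec_stream_kmers seq k out) := by unfold Spec_stream_kmers; infer_instance

-- ===== CLAIM (what is proved, stated in full; the proofs are below) =====
def Claim_equal_stream_kmers : Prop := ∀ (seq : String) (k : Int), Dom_stream_kmers seq k → Pre_stream_kmers seq k → Spec_stream_kmers seq k (stream_kmers seq k)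
def Claim_raises_stream_kmers : Prop := (∀ (seq : String) (k : Int), Dom_stream_kmers seq k → Raises_stream_kmers seq k → ¬ Pre_stream_kmers seq k) ∧ (Dom_stream_kmers (pvRaiseWitness_stream_kmers.1) (pvRaiseWitness_stream_kmers.2) ∧ Raises_stream_kmers (pvRaiseWitness_stream_kmers.1) (pvRaiseWitness_stream_kmers.2) ∧ stream_kmers_alt (pvRaiseWitness_stream_kmers.1) (pvRaiseWitness_stream_kmers.2) = pvRaiseWitnessOut_stream_kmers)

-- ===== LEMMAS AND PROOFS =====

-- Nat-level codes of a window: forward (MSB-first) and reverse-complement (LSB-first)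
def encN (c : Char) : Nat := (c.toNat >>> 1) &&& 3
def rencN (c : Char) : Nat := (encN c + 2) &&& 3
def fwdCode (l : List Char) : Nat := l.foldl (fun a c => a * 4 + encN c) 0
def revCode : List Char → Nat
  | [] => 0
  | c :: t => rencN c + 4 * revCode t

def hOut (w : List Char) : Int := xorshift (min ((fwdCode w : Nat) : Int) ((revCode w : Nat) : Int))

-- common sliding description: one output per consumed character, window = previous k-1 chars + it
def slideG : List Char → List Char → List Int
  | _, [] => []
  | p, c :: rest => hOut (p ++ [c]) :: slideG (p ++ [c]).tail rest

lemma encN_lt (c : Char) : encN c < 4 := by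
  have := Nat.and_le_right (n := c.toNat >>> 1) (m := 3); unfold encN; omega

lemma rencN_lt (c : Char) : rencN c < 4 := by
  have := Nat.and_le_right (n := encN c + 2) (m := 3); unfold rencN; omega

lemma cast_shl2 (a : Nat) : ((a : Int)) <<< (2 : Int) = ((a <<< 2 : Nat) : Int) := Int.mem_toNat?.mp rfl
lemma cast_shr2 (a : Nat) : ((a : Int)) >>> (2 : Int) = ((a >>> 2 : Nat) : Int) := Int.mem_toNat?.mp rfl
lemma cast_shr1 (a : Nat) : ((a : Int)) >>> (1 : Int) = ((a >>> 1 : Nat) : Int) := Int.mem_toNat?.mp rfl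
lemma cast_shl_nat (m s : Nat) : ((m : Int)) <<< (s : Nat) = ((m <<< s : Nat) : Int) :=
  Int.mem_toNat?.mp rfl

lemma encode_nucl_eq (c : Char) : encode_nucl c = (((encN c : Nat) : Int), ((rencN c : Nat) : Int)) := by
  simp only [encode_nucl, cast_shr1]
  have h3 : (3 : Int) = ((3 : Nat) : Int) := rfl
  have h2 : (2 : Int) = ((2 : Nat) : Int) := rfl
  rw [h3, h2, PySem.Int.band_natCast, ← Nat.cast_add, PySem.Int.band_natCast]
  simp [encN, rencN]

lemma fwdCode_aux (l : List Char) (a : Nat) :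
    l.foldl (fun a c => a * 4 + encN c) a = a * 4 ^ l.length + fwdCode l := by
  induction l generalizing a with
  | nil => simp [fwdCode]
  | cons c t ih =>
    have h0 : fwdCode (c :: t) = encN c * 4 ^ t.length + fwdCode t := by
      have := ih (encN c); simpa [fwdCode] using this
    simp only [List.foldl_cons, ih (a * 4 + encN c), h0, List.length_cons]
    ring

lemma fwdCode_cons (c : Char) (t : List Char) :
    fwdCode (c :: t) = encN c * 4 ^ t.length + fwdCode t := by
  have := fwdCode_aux t (encN c); simpa [fwdCode] using this

lemma fwdCode_append (l : List Char) (c : Char) :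
    fwdCode (l ++ [c]) = fwdCode l * 4 + encN c := by
  simp [fwdCode, List.foldl_append]

lemma fwdCode_lt (l : List Char) : fwdCode l < 4 ^ l.length := by
  induction l with
  | nil => simp [fwdCode]
  | cons c t ih =>
    have := encN_lt c
    have h0 := fwdCode_cons c t
    have : encN c * 4 ^ t.length + fwdCode t < 4 * 4 ^ t.length := by nlinarith
    simpa [h0, List.length_cons, pow_succ, Nat.mul_comm] using this

lemma revCode_append (l : List Char) (c : Char) :
    revCode (l ++ [c]) = revCode l + rencN c * 4 ^ l.length := by
  induction l with
  | nil => simp [revCode]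
  | cons a t ih => simp only [List.cons_append, revCode, ih, List.length_cons]; ring

lemma revCode_lt (l : List Char) : revCode l < 4 ^ l.length := by
  induction l with
  | nil => simp [revCode]
  | cons c t ih =>
    have := rencN_lt c
    simp only [revCode, List.length_cons, pow_succ]
    nlinarith

lemma fwdCode_mod_tail (l : List Char) (m : Nat) (h : l.length = m + 1) :
    fwdCode l % 4 ^ m = fwdCode l.tail := by
  cases l with
  | nil => simp at h
  | cons c t =>
    have ht : t.length = m := by simpa using h
    rw [fwdCode_cons, ht, Nat.add_comm, Nat.add_mul_mod_self_right,
        Nat.mod_eq_of_lt (by simpa [ht] using fwdCode_lt t)]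
    rfl

lemma revCode_div_tail (l : List Char) : revCode l / 4 = revCode l.tail := by
  cases l with
  | nil => simp [revCode]
  | cons c t =>
    have := rencN_lt c
    simp only [revCode, List.tail_cons]
    omega

-- bit steps, Nat-cast level
lemma step_fwd (a e : Nat) (he : e < 4) :
    PySem.Int.bor (((a : Nat) : Int) <<< (2 : Int)) ((e : Nat) : Int) = ((a * 4 + e : Nat) : Int) := by
  rw [cast_shl2, PySem.Int.bor_natCast]
  have h1 : a <<< 2 ||| e = a <<< 2 + e :=
    (Nat.shiftLeft_add_eq_or_of_lt (b := e) (i := 2) (by norm_num; omega) a).symm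
  have h2 : a <<< 2 = a * 4 := by rw [Nat.shiftLeft_eq]
  rw [h1, h2]

lemma step_or_high (x r m : Nat) (hx : x < 4 ^ m) :
    PySem.Int.bor ((x : Nat) : Int) (((r : Nat) : Int) <<< (2 * m : Nat)) = ((x + r * 4 ^ m : Nat) : Int) := by
  rw [cast_shl_nat, PySem.Int.bor_natCast]
  have hpow : (4 : Nat) ^ m = 2 ^ (2 * m) := by rw [Nat.pow_mul]
  have h1 : x ||| r <<< (2 * m) = r <<< (2 * m) ||| x := Nat.lor_comm _ _
  have h2 : r <<< (2 * m) ||| x = r <<< (2 * m) + x :=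
    (Nat.shiftLeft_add_eq_or_of_lt (b := x) (i := 2 * m) (by rw [← hpow]; exact hx) r).symm
  have h3 : r <<< (2 * m) = r * 4 ^ m := by rw [Nat.shiftLeft_eq, hpow]
  rw [h1, h2, h3, Nat.add_comm]

lemma or_mid (a e s : Nat) (he : e < 4) :
    PySem.Int.bor ((a * 4 ^ (s + 1) : Nat) : Int) (((e : Nat) : Int) <<< (2 * s : Nat)) =
      (((a * 4 + e) * 4 ^ s : Nat) : Int) := by
  rw [cast_shl_nat, PySem.Int.bor_natCast]
  have hpow : (4 : Nat) ^ s = 2 ^ (2 * s) := by rw [Nat.pow_mul]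
  have h0 : a * 4 ^ (s + 1) = (a * 4) <<< (2 * s) := by
    rw [Nat.shiftLeft_eq, ← hpow, pow_succ]; ring
  have h1 : (a * 4) <<< (2 * s) ||| e <<< (2 * s) = ((a * 4) ||| e) <<< (2 * s) :=
    Nat.shiftLeft_or_distrib.symm
  have h2 : (a * 4) ||| e = a * 4 + e := by
    have := (Nat.shiftLeft_add_eq_or_of_lt (b := e) (i := 2) (by norm_num; omega) a).symm
    simpa [Nat.shiftLeft_eq] using this
  rw [h0, h1, h2, Nat.shiftLeft_eq, ← hpow]

lemma mask_band (x m : Nat) :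
    PySem.Int.band ((x : Nat) : Int) (((1 <<< (2 * m) : Nat) : Int) - 1) = ((x % 4 ^ m : Nat) : Int) := by
  have h2 : (((1 <<< (2 * m) : Nat) : Int)) - 1 = (((2 ^ (2 * m) - 1 : Nat)) : Int) := by
    rw [Nat.shiftLeft_eq, one_mul]
    have : (1 : Nat) ≤ 2 ^ (2 * m) := Nat.one_le_two_pow
    push_cast [this]; ring
  rw [h2, PySem.Int.band_natCast, Nat.and_two_pow_sub_one_eq_mod]
  congr 1
  rw [Nat.pow_mul]


lemma take_succ_getElem (cs : List Char) (j : Nat) (hj : j < cs.length) :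
    cs.take (j + 1) = cs.take j ++ [cs[j]] := by
  rw [List.take_add_one]
  simp [List.getElem?_eq_getElem hj]

lemma setup_eq (cs : List Char) (m : Nat) (kk : Int) (hkk : kk = (m : Int) + 1)
    (hm : m ≤ cs.length) :
    (PySem.List.pyRange 0 (kk - 1) 1).foldl (fun (st : Int × Int) i =>
        let nr := encode_nucl (PySem.List.pyGetD cs i ' ')
        (PySem.Int.bor st.1 (nr.1 <<< (2 * (kk - 2 - i)).toNat),
         PySem.Int.bor st.2 (nr.2 <<< (2 * (i + 1)).toNat))) (0, 0)
    = (((fwdCode (cs.take m) : Nat) : Int), ((4 * revCode (cs.take m) : Nat) : Int)) := by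
  subst hkk
  have aux : ∀ j : Nat, j ≤ m →
      (PySem.List.pyRange 0 (j : Int) 1).foldl (fun (st : Int × Int) i =>
          let nr := encode_nucl (PySem.List.pyGetD cs i ' ')
          (PySem.Int.bor st.1 (nr.1 <<< (2 * ((m : Int) + 1 - 2 - i)).toNat),
           PySem.Int.bor st.2 (nr.2 <<< (2 * (i + 1)).toNat))) (0, 0)
      = (((fwdCode (cs.take j) * 4 ^ (m - j) : Nat) : Int),
         ((4 * revCode (cs.take j) : Nat) : Int)) := by
    intro j
    induction j with
    | zero =>
      intro _
      simp [PySem.List.pyRange_one_eq_nil, fwdCode, revCode]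
    | succ j ih =>
      intro hj
      have hjm : j < m := hj
      have hjl : j < cs.length := lt_of_lt_of_le hjm hm
      have hc : ((j + 1 : Nat) : Int) = (j : Int) + 1 := by push_cast; ring
      rw [hc, PySem.List.pyRange_one_succ_right (by positivity), List.foldl_append,
          ih (le_of_lt hjm)]
      simp only [List.foldl_cons, List.foldl_nil, PySem.List.pyGetD_natCast,
        List.getD_eq_getElem cs ' ' hjl, encode_nucl_eq]
      have e1 : (2 * ((m : Int) + 1 - 2 - (j : Int))).toNat = 2 * (m - 1 - j) := by omega
      have e2 : (2 * ((j : Int) + 1)).toNat = 2 * (j + 1) := by omega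
      have e3 : m - j = (m - 1 - j) + 1 := by omega
      rw [e1, e2, e3]
      have htk : cs.take (j + 1) = cs.take j ++ [cs[j]] := take_succ_getElem cs j hjl
      have hlen : (cs.take j).length = j := by simp [Nat.le_of_lt hjl]
      simp only [Prod.mk.injEq]
      constructor
      · rw [or_mid _ _ _ (encN_lt _)]
        congr 1
        rw [htk, fwdCode_append]
        have he : m - (j + 1) = m - 1 - j := by omega
        rw [he]
      · have hR := revCode_lt (cs.take j)
        rw [hlen] at hR
        have hx : 4 * revCode (cs.take j) < 4 ^ (j + 1) := by
          rw [pow_succ]; omega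
        rw [step_or_high _ _ (j + 1) hx]
        congr 1
        rw [htk, revCode_append, hlen]
        ring
  have hm1 : (m : Int) + 1 - 1 = (m : Int) := by ring
  rw [hm1]
  have := aux m le_rfl
  simpa using this

-- A's main-loop body, with the shift amount already evaluated to 2*m
def stepA (m : Nat) (st : Int × Int × List Int) (c : Char) : Int × Int × List Int :=
  let nr := encode_nucl c
  let kmer := PySem.Int.bor ((PySem.Int.band st.1 ((1 <<< (2 * m : Nat)) - 1)) <<< 2) nr.1
  let rkmer := PySem.Int.bor (st.2.1 >>> 2) (nr.2 <<< (2 * m : Nat))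
  (kmer, rkmer, st.2.2 ++ [xorshift (min kmer rkmer)])

lemma stepA_eq (m : Nat) (x y : Nat) (acc : List Int) (c : Char) (hylt : y < 4 ^ (m + 1)) :
    stepA m (((x : Nat) : Int), ((y : Nat) : Int), acc) c =
      (((x % 4 ^ m * 4 + encN c : Nat) : Int), ((y / 4 + rencN c * 4 ^ m : Nat) : Int),
       acc ++ [xorshift (min ((x % 4 ^ m * 4 + encN c : Nat) : Int)
                             ((y / 4 + rencN c * 4 ^ m : Nat) : Int))]) := by
  have hdiv : y / 4 < 4 ^ m := by
    rw [Nat.div_lt_iff_lt_mul (by norm_num : 0 < 4)]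
    calc y < 4 ^ (m + 1) := hylt
      _ = 4 ^ m * 4 := by rw [pow_succ]
  have hy4 : y >>> 2 = y / 4 := by
    rw [Nat.shiftRight_eq_div_pow]
  simp only [stepA, encode_nucl_eq, cast_shr2, hy4]
  rw [mask_band, step_fwd _ _ (encN_lt c), step_or_high _ _ m hdiv]

lemma main_inv (m : Nat) :
    ∀ (rest p : List Char) (x y : Nat) (acc : List Int),
    p.length = m → x % 4 ^ m = fwdCode p → y / 4 = revCode p → y < 4 ^ (m + 1) →
    ∃ x' y' : Nat,
      rest.foldl (stepA m) (((x : Nat) : Int), ((y : Nat) : Int), acc)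
      = (((x' : Nat) : Int), ((y' : Nat) : Int), acc ++ slideG p rest) := by
  intro rest
  induction rest with
  | nil =>
    intro p x y acc _ _ _ _
    exact ⟨x, y, by simp [slideG]⟩
  | cons c rest ih =>
    intro p x y acc hp hx hy hylt
    rw [List.foldl_cons, stepA_eq m x y acc c hylt]
    have hxe : x % 4 ^ m * 4 + encN c = fwdCode (p ++ [c]) := by
      rw [hx, ← fwdCode_append]
    have hye : y / 4 + rencN c * 4 ^ m = revCode (p ++ [c]) := by
      rw [hy, ← hp, ← revCode_append]
    rw [hxe, hye]
    have hlen' : (p ++ [c]).tail.length = m := by simp [hp]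
    have hx' : fwdCode (p ++ [c]) % 4 ^ m = fwdCode (p ++ [c]).tail :=
      fwdCode_mod_tail _ m (by simp [hp])
    have hy' : revCode (p ++ [c]) / 4 = revCode (p ++ [c]).tail := revCode_div_tail _
    have hylt' : revCode (p ++ [c]) < 4 ^ (m + 1) := by
      have := revCode_lt (p ++ [c])
      simpa [hp] using this
    obtain ⟨x', y', hfold⟩ := ih (p ++ [c]).tail (fwdCode (p ++ [c])) (revCode (p ++ [c]))
      (acc ++ [xorshift (min ((fwdCode (p ++ [c]) : Nat) : Int) ((revCode (p ++ [c]) : Nat) : Int))])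
      hlen' hx' hy' hylt'
    refine ⟨x', y', ?_⟩
    rw [hfold]
    simp [slideG, hOut]

lemma inner_eq (cs : List Char) (K : Nat) (kk : Int) (hkk : kk = (K : Int)) (s : Nat)
    (hs : s + K ≤ cs.length) :
    (PySem.List.pyRange 0 kk 1).foldl (fun (st : Int × Int) t =>
        let nr := encode_nucl (PySem.List.pyGetD cs (((s : Nat) : Int) + t) ' ')
        (PySem.Int.bor (st.1 <<< 2) nr.1,
         PySem.Int.bor st.2 (nr.2 <<< (2 * t).toNat))) (0, 0)
    = (((fwdCode ((cs.drop s).take K) : Nat) : Int),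
       ((revCode ((cs.drop s).take K) : Nat) : Int)) := by
  subst hkk
  have aux : ∀ j : Nat, j ≤ K →
      (PySem.List.pyRange 0 (j : Int) 1).foldl (fun (st : Int × Int) t =>
          let nr := encode_nucl (PySem.List.pyGetD cs (((s : Nat) : Int) + t) ' ')
          (PySem.Int.bor (st.1 <<< 2) nr.1,
           PySem.Int.bor st.2 (nr.2 <<< (2 * t).toNat))) (0, 0)
      = (((fwdCode ((cs.drop s).take j) : Nat) : Int),
         ((revCode ((cs.drop s).take j) : Nat) : Int)) := by
    intro j
    induction j with
    | zero =>
      intro _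
      simp [PySem.List.pyRange_one_eq_nil, fwdCode, revCode]
    | succ j ih =>
      intro hj
      have hsj : s + j < cs.length := by omega
      have hjd : j < (cs.drop s).length := by
        rw [List.length_drop]; omega
      have hc : ((j + 1 : Nat) : Int) = (j : Int) + 1 := by push_cast; ring
      rw [hc, PySem.List.pyRange_one_succ_right (by positivity), List.foldl_append,
          ih (by omega)]
      have hadd : ((s : Nat) : Int) + (j : Int) = ((s + j : Nat) : Int) := by push_cast; ring
      simp only [List.foldl_cons, List.foldl_nil, hadd, PySem.List.pyGetD_natCast,
        List.getD_eq_getElem cs ' ' hsj, encode_nucl_eq]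
      have e2 : (2 * (j : Int)).toNat = 2 * j := by omega
      rw [e2]
      have htk : (cs.drop s).take (j + 1) = (cs.drop s).take j ++ [cs[s + j]] := by
        rw [take_succ_getElem (cs.drop s) j hjd]
        congr 1
        simp [List.getElem_drop]
      have hlen : ((cs.drop s).take j).length = j := by
        simp [List.length_take, List.length_drop]; omega
      have hR := revCode_lt ((cs.drop s).take j)
      rw [hlen] at hR
      simp only [Prod.mk.injEq]
      constructor
      · rw [step_fwd _ _ (encN_lt _)]
        rw [htk, fwdCode_append]
      · rw [step_or_high _ _ j hR]
        rw [htk, revCode_append, hlen]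
  exact aux K le_rfl

lemma drop_succ_shift (p : List Char) (c : Char) (rest : List Char) (s : Nat) :
    (p ++ c :: rest).drop (s + 1) = (((p ++ [c]).tail) ++ rest).drop s := by
  cases p with
  | nil => simp
  | cons a q => simp [List.append_assoc]

lemma windows_eq (m : Nat) :
    ∀ (rest p : List Char), p.length = m →
    (List.range rest.length).map (fun s => hOut (((p ++ rest).drop s).take (m + 1)))
      = slideG p rest := by
  intro rest
  induction rest with
  | nil =>
    intro p hp
    simp [slideG]
  | cons c rest ih =>
    intro p hp
    have hm : (p ++ [c]).tail.length = m := by simp [hp]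
    have hhead : ((p ++ c :: rest).drop 0).take (m + 1) = p ++ [c] := by
      rw [List.drop_zero]
      have hsplit : p ++ c :: rest = (p ++ [c]) ++ rest := by simp
      have hl : (p ++ [c]).length = m + 1 := by simp [hp]
      rw [hsplit, ← hl, List.take_left]
    rw [List.length_cons, List.range_succ_eq_map, List.map_cons, List.map_map]
    have hmapeq : (List.range rest.length).map
          ((fun s => hOut (((p ++ c :: rest).drop s).take (m + 1))) ∘ (· + 1))
        = (List.range rest.length).map
          (fun s => hOut (((((p ++ [c]).tail) ++ rest).drop s).take (m + 1))) := by
      apply List.map_congr_left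
      intro s _
      simp only [Function.comp_apply]
      rw [drop_succ_shift]
    rw [hhead, hmapeq, ih (p ++ [c]).tail hm]
    simp [slideG]

lemma portA_eq (seq : String) (m : Nat) (hmn : m ≤ seq.toList.length) :
    stream_kmers seq ((m : Int) + 1) = slideG (seq.toList.take m) (seq.toList.drop m) := by
  simp only [stream_kmers]
  rw [setup_eq seq.toList m ((m : Int) + 1) rfl hmn]
  have hb : (m : Int) + 1 - 1 = (m : Int) := by ring
  rw [hb]
  have hsh2 : (2 * (m : Int)).toNat = 2 * m := by omega
  simp only [hsh2]
  rw [PySem.List.foldl_pyRange_pyGetD seq.toList ' '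
      (fun (st : Int × Int × List Int) c =>
        let nr := encode_nucl c
        let kmer := PySem.Int.bor
          ((PySem.Int.band st.1 ((1 <<< (2 * m : Nat)) - 1)) <<< 2) nr.1
        let rkmer := PySem.Int.bor (st.2.1 >>> 2) (nr.2 <<< (2 * m : Nat))
        (kmer, rkmer, st.2.2 ++ [xorshift (min kmer rkmer)]))
      _ (by positivity)]
  have htn : ((m : Int)).toNat = m := by omega
  rw [htn]
  have hp : (seq.toList.take m).length = m := by
    rw [List.length_take, Nat.min_eq_left hmn]
  have hF := fwdCode_lt (seq.toList.take m)
  rw [hp] at hF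
  have hR := revCode_lt (seq.toList.take m)
  rw [hp] at hR
  obtain ⟨x', y', hfold⟩ := main_inv m (seq.toList.drop m) (seq.toList.take m)
    (fwdCode (seq.toList.take m)) (4 * revCode (seq.toList.take m)) []
    hp (Nat.mod_eq_of_lt hF) (Nat.mul_div_cancel_left _ (by norm_num))
    (by rw [pow_succ]; omega)
  show (List.foldl (stepA m)
      (((fwdCode (seq.toList.take m) : Nat) : Int),
       ((4 * revCode (seq.toList.take m) : Nat) : Int), ([] : List Int))
      (seq.toList.drop m)).2.2 = _
  rw [hfold]
  simp

lemma portB_eq (seq : String) (m : Nat) (hmn : m ≤ seq.toList.length) :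
    stream_kmers_alt seq ((m : Int) + 1) = slideG (seq.toList.take m) (seq.toList.drop m) := by
  simp only [stream_kmers_alt, PySem.List.len_eq]
  rw [if_neg (by omega : ¬((m : Int) + 1 < 1))]
  have hb : (seq.toList.length : Int) - ((m : Int) + 1) + 1 = ((seq.toList.length - m : Nat) : Int) := by
    omega
  rw [hb, PySem.List.pyRange_zero_nat, List.map_map]
  have hmap : (List.range (seq.toList.length - m)).map
        ((fun start =>
          let w := (PySem.List.pyRange 0 ((m : Int) + 1) 1).foldl (fun (st : Int × Int) t =>
              let nr := encode_nucl (PySem.List.pyGetD seq.toList (start + t) ' ')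
              (PySem.Int.bor (st.1 <<< 2) nr.1,
               PySem.Int.bor st.2 (nr.2 <<< (2 * t).toNat))) (0, 0)
          xorshift (min w.1 w.2)) ∘ (fun s : Nat => (s : Int)))
      = (List.range (seq.toList.length - m)).map
        (fun s : Nat => hOut ((seq.toList.drop s).take (m + 1))) := by
    apply List.map_congr_left
    intro s hs
    rw [List.mem_range] at hs
    have hsK : s + (m + 1) ≤ seq.toList.length := by omega
    simp only [Function.comp_apply]
    have hc1 : ((m : Int) + 1) = (((m + 1 : Nat)) : Int) := by push_cast; ring
    rw [hc1, inner_eq seq.toList (m + 1) _ rfl s hsK]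
    rfl
  rw [hmap]
  have hrl : (seq.toList.drop m).length = seq.toList.length - m := by
    simp
  have hpl : (seq.toList.take m).length = m := by
    rw [List.length_take, Nat.min_eq_left hmn]
  have := windows_eq m (seq.toList.drop m) (seq.toList.take m) hpl
  rw [List.take_append_drop] at this
  rw [← hrl, this]

-- ===== VERDICT (by name: the statement is the Claim_ definition above) =====
theorem stream_kmers_spec : Claim_equal_stream_kmers := by
  intro seq k _ hpre
  unfold Spec_stream_kmers
  obtain ⟨hk, hlen⟩ := hpre
  obtain ⟨m, rfl⟩ : ∃ m : Nat, k = (m : Int) + 1 := ⟨(k - 1).toNat, by omega⟩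
  have hmn : m ≤ seq.toList.length := by omega
  rw [portA_eq seq m hmn, portB_eq seq m hmn]

@[simp]
theorem stream_kmers_raises : Claim_raises_stream_kmers := by
  unfold Claim_raises_stream_kmers
  exact ⟨by
    intro seq k _ hr hp
    unfold Raises_stream_kmers at hr
    unfold Pre_stream_kmers at hp
    omega, by decide⟩
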